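-- pv_equiv track=rewrite | github.com/muilyang12/Algorithm | Test/10-22-2024-T.py | countBalancedClips
-- ===== SOURCE A (Python) =====
-- MODULO = 1000000007
--
-- def countBalancedClips(clipLength, diff):
--     dp = [[0, [0 for _ in range(26)]] for __ in range(clipLength + 1)]
--     dp[1][0] = 26
--     dp[1][1] = [1 for _ in range(26)]
--
--     for i in range(2, clipLength + 1):
--         currentSum = 0
--
--         for j in range(26):
--             for k in range(-diff, diff + 1):
--                 if j + k < 0 or j + k >= 26:
--                     continue
--
--                 dp[i][1][j] += dp[i - 1][1][j + k]
--
--             dp[i][1][j] %= MODULO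
--
--             currentSum += dp[i][1][j]
--
--         dp[i][0] = currentSum % MODULO
--
--     return dp[-1][0]
-- ===== SOURCE B (Python) =====
-- MODULO = 1000000007
--
-- def _prefix(prev):
--     pref = [0] * 27
--     for j in range(26):
--         pref[j + 1] = pref[j] + prev[j]
--     return pref
--
-- def _step(prev, diff):
--     pref = _prefix(prev)
--     cur = [0] * 26
--     for j in range(26):
--         lo = max(0, j - diff)
--         hi = min(25, j + diff)
--         cur[j] = (pref[hi + 1] - pref[lo]) % MODULO if lo <= hi else 0
--     return cur
--
-- def countBalancedClips(clipLength, diff):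
--     prev = [1] * 26
--     for _ in range(clipLength - 1):
--         prev = _step(prev, diff)
--     return sum(prev) % MODULO
-- ===== Notes on version B (the rewrite author's own statement) =====
-- stated objective: faster
-- what changed: Replaces A's inner O(diff) scan per letter (and the full dp table) with a 27-entry prefix-sum array per row, so each window sum is one subtraction; only the previous row is kept.
import Mathlib
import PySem

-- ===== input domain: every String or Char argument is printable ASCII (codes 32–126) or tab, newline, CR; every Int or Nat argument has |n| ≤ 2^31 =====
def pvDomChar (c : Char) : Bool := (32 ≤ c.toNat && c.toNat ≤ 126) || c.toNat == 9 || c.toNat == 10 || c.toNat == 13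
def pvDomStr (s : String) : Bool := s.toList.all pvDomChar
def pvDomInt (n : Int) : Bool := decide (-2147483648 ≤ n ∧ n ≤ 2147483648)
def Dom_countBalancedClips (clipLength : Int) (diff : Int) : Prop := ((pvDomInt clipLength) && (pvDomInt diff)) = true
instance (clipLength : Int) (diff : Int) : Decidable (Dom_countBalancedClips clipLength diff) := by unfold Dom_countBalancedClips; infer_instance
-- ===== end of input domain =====

-- B replaces A's inner O(diff) window scan per letter by a 27-entry prefix-sum array per row
-- (window sum = one subtraction) and keeps only the previous row instead of the full dp table: faster.

def pvMODULO : Int := 1000000007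

-- ===== PORT A =====
-- one iteration of A's 'for j in range(26)' loop body over the previous row (dp[i-1][1] is
-- unchanged while row i is filled, so it is read once as `prev`); returns (currentSum % MODULO, row i).
def pvARow (diff : Int) (prev : List Int) : Int × List Int :=
  let st := (PySem.List.pyRange 0 26 1).foldl
    (fun (st : Int × List Int) j =>
      let v := PySem.Int.mod
        ((PySem.List.pyRange (-diff) (diff + 1) 1).foldl
          (fun acc k => if j + k < 0 ∨ 26 ≤ j + k then acc else acc + PySem.List.pyGetD prev (j + k) 0)
          (PySem.List.pyGetD st.2 j 0)) pvMODULO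
      (st.1 + v, PySem.List.pySetD st.2 j v))
    (0, List.replicate 26 0)
  (PySem.Int.mod st.1 pvMODULO, st.2)

-- body of A's 'for i in range(2, clipLength + 1)' loop (dp[i] = ...)
def pvAStep (diff : Int) (dp : List (Int × List Int)) (i : Int) : List (Int × List Int) :=
  PySem.List.pySetD dp i (pvARow diff (PySem.List.pyGetD dp (i - 1) (0, [])).2)

def countBalancedClips (clipLength : Int) (diff : Int) : Int :=
  let dp : List (Int × List Int) := List.replicate (clipLength + 1).toNat (0, List.replicate 26 0)
  let dp := PySem.List.pySetD dp 1 (26, List.replicate 26 1)  -- dp[1][0]=26; dp[1][1]=[1]*26 (IndexError in Python when clipLength < 1: outside Pre_)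
  let dp := (PySem.List.pyRange 2 (clipLength + 1) 1).foldl (pvAStep diff) dp
  (PySem.List.pyGetD dp (-1) (0, [])).1

-- ===== PORT B =====
def pvPrefix (prev : List Int) : List Int :=
  (PySem.List.pyRange 0 26 1).foldl
    (fun pref j => PySem.List.pySetD pref (j + 1) (PySem.List.pyGetD pref j 0 + PySem.List.pyGetD prev j 0))
    (List.replicate 27 0)

def pvBStep (prev : List Int) (diff : Int) : List Int :=
  let pref := pvPrefix prev
  (PySem.List.pyRange 0 26 1).foldl
    (fun cur j =>
      let lo := max 0 (j - diff)
      let hi := min 25 (j + diff)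
      PySem.List.pySetD cur j
        (if lo ≤ hi then PySem.Int.mod (PySem.List.pyGetD pref (hi + 1) 0 - PySem.List.pyGetD pref lo 0) pvMODULO else 0))
    (List.replicate 26 0)

def countBalancedClips_alt (clipLength : Int) (diff : Int) : Int :=
  let prev := (PySem.List.pyRange 0 (clipLength - 1) 1).foldl
    (fun prev _ => pvBStep prev diff) (List.replicate 26 1)
  PySem.Int.mod prev.sum pvMODULO

-- ===== PRECONDITION & SPEC =====
-- A indexes dp[1] into a table of clipLength+1 rows, so it raises IndexError for clipLength < 1.
def Pre_countBalancedClips (clipLength : Int) (diff : Int) : Prop := 1 ≤ clipLength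
instance (clipLength : Int) (diff : Int) : Decidable (Pre_countBalancedClips clipLength diff) := by unfold Pre_countBalancedClips; infer_instance
def pvWitness_countBalancedClips : Int × Int := (3, 1)

def Spec_countBalancedClips (clipLength : Int) (diff : Int) (out : Int) : Prop := out = countBalancedClips_alt clipLength diff
instance (clipLength : Int) (diff : Int) (out : Int) : Decidable (Spec_countBalancedClips clipLength diff out) := by unfold Spec_countBalancedClips; infer_instance

-- ===== CLAIM (what is proved, stated in full; the proofs are below) =====
def Claim_equal_countBalancedClips : Prop := ∀ (clipLength : Int) (diff : Int), Dom_countBalancedClips clipLength diff → Pre_countBalancedClips clipLength diff → Spec_countBalancedClips clipLength diff (countBalancedClips clipLength diff)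

-- ===== LEMMAS AND PROOFS =====

-- A's row sequence (rows 1, 2, ...): proof-side description of A's dp table contents
def pvAIter (diff : Int) : Nat -> (Int × List Int) -> (Int × List Int)
  | 0, p => p
  | n + 1, p => pvAIter diff n (pvARow diff p.2)


def pvP (prev : List Int) (t : Int) : Int :=
  ((PySem.List.pyRange 0 t 1).map (fun m => PySem.List.pyGetD prev m 0)).sum

theorem pvP_step (prev : List Int) (a : Int) :
    (if 0 ≤ a ∧ a < 26 then PySem.List.pyGetD prev a 0 else 0)
      = pvP prev (min 26 (max 0 (a + 1))) - pvP prev (min 26 (max 0 a)) := by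
  by_cases h : 0 ≤ a ∧ a < 26
  · rw [if_pos h]
    have h1 : min 26 (max 0 (a + 1)) = a + 1 := by omega
    have h2 : min 26 (max 0 a) = a := by omega
    rw [h1, h2]
    unfold pvP
    rw [PySem.List.pyRange_one_succ_right h.1]
    simp
  · rw [if_neg h]
    rcases (by omega : a < 0 ∨ 26 ≤ a) with hc | hc
    · have h1 : min 26 (max 0 (a + 1)) = 0 := by omega
      have h2 : min 26 (max 0 a) = 0 := by omega
      rw [h1, h2]; ring
    · have h1 : min 26 (max 0 (a + 1)) = 26 := by omega
      have h2 : min 26 (max 0 a) = 26 := by omega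
      rw [h1, h2]; ring

theorem pvSumRange (prev : List Int) : ∀ (n : Nat) (a acc : Int),
    (PySem.List.pyRange a (a + n) 1).foldl
        (fun acc m => acc + (if 0 ≤ m ∧ m < 26 then PySem.List.pyGetD prev m 0 else 0)) acc
      = acc + pvP prev (min 26 (max 0 (a + n))) - pvP prev (min 26 (max 0 a)) := by
  intro n
  induction n with
  | zero => intro a acc; rw [PySem.List.pyRange_one_eq_nil (by omega)]; simp
  | succ n ih =>
    intro a acc
    rw [PySem.List.pyRange_one_cons (by omega : a < a + (n + 1 : Nat))]
    rw [List.foldl_cons]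
    have harg : a + ((n : Nat) + 1 : Nat) = (a + 1) + (n : Nat) := by push_cast; ring
    rw [harg, ih (a + 1) (acc + _)]
    have := pvP_step prev a
    omega



theorem pvReindex (prev : List Int) (j : Int) : ∀ (n : Nat) (a acc : Int),
    (PySem.List.pyRange a (a + n) 1).foldl
        (fun acc k => if j + k < 0 ∨ 26 ≤ j + k then acc else acc + PySem.List.pyGetD prev (j + k) 0) acc
      = (PySem.List.pyRange (j + a) (j + a + n) 1).foldl
        (fun acc m => acc + (if 0 ≤ m ∧ m < 26 then PySem.List.pyGetD prev m 0 else 0)) acc := by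
  intro n
  induction n with
  | zero =>
    intro a acc
    rw [PySem.List.pyRange_one_eq_nil (by omega), PySem.List.pyRange_one_eq_nil (by omega)]
    rfl
  | succ n ih =>
    intro a acc
    rw [PySem.List.pyRange_one_cons (by omega : a < a + (n + 1 : Nat)),
        PySem.List.pyRange_one_cons (by omega : j + a < j + a + (n + 1 : Nat))]
    rw [List.foldl_cons, List.foldl_cons]
    have harg : a + ((n : Nat) + 1 : Nat) = (a + 1) + (n : Nat) := by push_cast; ring
    have harg2 : j + a + ((n : Nat) + 1 : Nat) = j + (a + 1) + (n : Nat) := by push_cast; ring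
    have hbody : (if j + a < 0 ∨ 26 ≤ j + a then acc else acc + PySem.List.pyGetD prev (j + a) 0)
        = acc + (if 0 ≤ j + a ∧ j + a < 26 then PySem.List.pyGetD prev (j + a) 0 else 0) := by
      split_ifs with h1 h2 h3 <;> omega
    rw [harg, harg2, hbody, ih (a + 1)]
    have e : j + (a + 1) = j + a + 1 := by ring
    rw [e]

theorem pvFoldl_const {α : Type} (f : α → α) : ∀ (l : List Int) (init : α),
    l.foldl (fun p _ => f p) init = f^[l.length] init := by
  intro l
  induction l with
  | nil => intro init; simp
  | cons x xs ih => intro init; simp [ih, Function.iterate_succ_apply]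



theorem pvP_succ (prev : List Int) (m : Int) (h : 0 ≤ m) :
    pvP prev (m + 1) = pvP prev m + PySem.List.pyGetD prev m 0 := by
  unfold pvP
  rw [PySem.List.pyRange_one_succ_right h]
  simp

theorem pvPrefix_build (prev : List Int) : ∀ (m : Nat), m ≤ 26 →
    (PySem.List.pyRange 0 m 1).foldl
        (fun pref j => PySem.List.pySetD pref (j + 1) (PySem.List.pyGetD pref j 0 + PySem.List.pyGetD prev j 0))
        (List.replicate 27 0)
      = ((PySem.List.pyRange 0 (m + 1) 1).map (fun t => pvP prev t)) ++ List.replicate (26 - m) (0 : Int) := by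
  intro m
  induction m with
  | zero =>
    intro _
    rw [PySem.List.pyRange_one_eq_nil (by omega)]
    rw [show ((0:Nat):Int) + 1 = 0 + 1 by norm_num, PySem.List.pyRange_one_singleton]
    simp [pvP, PySem.List.pyRange_one_eq_nil (by omega : (0:Int) ≤ 0)]
  | succ m ih =>
    intro hm
    have hcast : ((m + 1 : Nat) : Int) = (m : Int) + 1 := by push_cast; ring
    rw [hcast, PySem.List.pyRange_one_succ_right (by positivity), List.foldl_append]
    rw [ih (by omega)]
    set L1 : List Int := (PySem.List.pyRange 0 ((m : Int) + 1) 1).map (fun t => pvP prev t) with hL1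
    have hlen1 : L1.length = m + 1 := by
      simp [hL1, PySem.List.length_pyRange_one]
    simp only [List.foldl_cons, List.foldl_nil]
    have hget : PySem.List.pyGetD (L1 ++ List.replicate (26 - m) (0:Int)) (m : Int) 0 = pvP prev (m : Int) := by
      rw [PySem.List.pyGetD_natCast]
      rw [List.getD_eq_getElem?_getD, List.getElem?_append_left (by omega)]
      rw [hL1, ← hcast, PySem.List.getElem?_map_pyRange_zero _ (m + 1) m (by omega)]
      simp
    rw [hget]
    have hset : ((m : Int) + 1) = (((m + 1 : Nat) : Int)) := by push_cast; ring
    rw [hset, PySem.List.pySetD_natCast]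
    rw [List.set_append_right _ _ (by omega)]
    rw [show 26 - m = (25 - m) + 1 by omega, List.replicate_succ]
    simp only [hlen1, Nat.sub_self, List.set_cons_zero]
    rw [← pvP_succ prev m (by positivity)]
    have hr : PySem.List.pyRange 0 ((m:Int) + 1 + 1) 1 = PySem.List.pyRange 0 ((m:Int) + 1) 1 ++ [(m:Int) + 1] := by
      rw [PySem.List.pyRange_one_succ_right (by positivity)]
    have hb : ((m + 1 : Nat) : Int) + 1 = ((m : Int) + 1) + 1 := by push_cast; ring
    rw [hb, hr, show 26 - (m + 1) = 25 - m by omega]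
    simp [hL1]

theorem pvPrefix_getD (prev : List Int) (t : Int) (h0 : 0 ≤ t) (h1 : t ≤ 26) :
    PySem.List.pyGetD (pvPrefix prev) t 0 = pvP prev t := by
  have h := pvPrefix_build prev 26 (by omega)
  unfold pvPrefix
  rw [show ((26:Nat):Int) = 26 by norm_num] at h
  rw [h]
  simp only [Nat.sub_self, List.replicate_zero, List.append_nil]
  rw [PySem.List.pyGetD_map_pyRange_of_nonneg _ _ _ _ h0 (by omega)]

theorem pvValEq (prev : List Int) (diff j : Int) (h0 : 0 ≤ j) (h1 : j < 26) :
    PySem.Int.mod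
        ((PySem.List.pyRange (-diff) (diff + 1) 1).foldl
          (fun acc k => if j + k < 0 ∨ 26 ≤ j + k then acc else acc + PySem.List.pyGetD prev (j + k) 0) 0)
        pvMODULO
      = (if max 0 (j - diff) ≤ min 25 (j + diff) then
          PySem.Int.mod (PySem.List.pyGetD (pvPrefix prev) (min 25 (j + diff) + 1) 0
            - PySem.List.pyGetD (pvPrefix prev) (max 0 (j - diff)) 0) pvMODULO
         else 0) := by
  by_cases hd : 0 ≤ diff
  · rw [if_pos (by omega)]
    rw [pvPrefix_getD prev _ (by omega) (by omega), pvPrefix_getD prev _ (by omega) (by omega)]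
    have hn : (diff + 1 : Int) = -diff + ((2 * diff + 1).toNat : Int) := by omega
    rw [hn, pvReindex prev j ((2 * diff + 1).toNat) (-diff) 0]
    rw [pvSumRange prev ((2 * diff + 1).toNat) (j + -diff) 0]
    have e1 : min 26 (max 0 (j + -diff + ((2 * diff + 1).toNat : Int))) = min 25 (j + diff) + 1 := by omega
    have e2 : min 26 (max 0 (j + -diff)) = max 0 (j - diff) := by omega
    rw [e1, e2]
    ring_nf
  · rw [if_neg (by omega)]
    rw [PySem.List.pyRange_one_eq_nil (by omega)]
    simp only [List.foldl_nil]
    decide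

-- generic fill-by-index loop over indices 0..m-1 into a 26-slot buffer, with a running sum
theorem pvAFill (f : Int → Int → Int) : ∀ (m : Nat), m ≤ 26 →
    (PySem.List.pyRange 0 m 1).foldl
      (fun (st : Int × List Int) j =>
        (st.1 + f (PySem.List.pyGetD st.2 j 0) j, PySem.List.pySetD st.2 j (f (PySem.List.pyGetD st.2 j 0) j)))
      (0, List.replicate 26 0)
    = (((PySem.List.pyRange 0 m 1).map (fun j => f 0 j)).sum,
       ((PySem.List.pyRange 0 m 1).map (fun j => f 0 j)) ++ List.replicate (26 - m) 0) := by
  intro m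
  induction m with
  | zero =>
    intro _
    rw [PySem.List.pyRange_one_eq_nil (by omega)]
    simp
  | succ m ih =>
    intro hm
    have hcast : ((m + 1 : Nat) : Int) = (m : Int) + 1 := by push_cast; ring
    rw [hcast, PySem.List.pyRange_one_succ_right (by positivity), List.foldl_append]
    rw [ih (by omega)]
    set L1 : List Int := (PySem.List.pyRange 0 (m : Int) 1).map (fun j => f 0 j) with hL1
    have hlen1 : L1.length = m := by
      simp [hL1, PySem.List.length_pyRange_one]
    simp only [List.foldl_cons, List.foldl_nil]
    have hget : PySem.List.pyGetD (L1 ++ List.replicate (26 - m) (0:Int)) (m : Int) 0 = 0 := by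
      rw [PySem.List.pyGetD_natCast]
      rw [List.getD_eq_getElem?_getD, List.getElem?_append_right (by omega)]
      rw [hlen1, Nat.sub_self]
      rw [List.getElem?_replicate]
      simp [show 0 < 26 - m by omega]
    rw [hget]
    rw [PySem.List.pySetD_natCast]
    rw [List.set_append_right _ _ (by omega)]
    rw [show 26 - m = (25 - m) + 1 by omega, List.replicate_succ]
    simp only [hlen1, Nat.sub_self, List.set_cons_zero]
    rw [show 26 - (m + 1) = 25 - m by omega]
    refine Prod.ext ?_ ?_ <;> simp [hL1]

theorem pvBFill (v : Int → Int) : ∀ (m : Nat), m ≤ 26 →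
    (PySem.List.pyRange 0 m 1).foldl
      (fun (cur : List Int) j => PySem.List.pySetD cur j (v j)) (List.replicate 26 0)
    = ((PySem.List.pyRange 0 m 1).map v) ++ List.replicate (26 - m) 0 := by
  intro m
  induction m with
  | zero =>
    intro _
    rw [PySem.List.pyRange_one_eq_nil (by omega)]
    simp
  | succ m ih =>
    intro hm
    have hcast : ((m + 1 : Nat) : Int) = (m : Int) + 1 := by push_cast; ring
    rw [hcast, PySem.List.pyRange_one_succ_right (by positivity), List.foldl_append]
    rw [ih (by omega)]
    have hlen1 : ((PySem.List.pyRange 0 (m : Int) 1).map v).length = m := by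
      simp [PySem.List.length_pyRange_one]
    simp only [List.foldl_cons, List.foldl_nil]
    rw [PySem.List.pySetD_natCast]
    rw [List.set_append_right _ _ (by omega)]
    rw [show 26 - m = (25 - m) + 1 by omega, List.replicate_succ]
    simp only [hlen1, Nat.sub_self, List.set_cons_zero]
    rw [show 26 - (m + 1) = 25 - m by omega]
    simp

theorem pvRowEq (diff : Int) (prev : List Int) :
    pvARow diff prev = (PySem.Int.mod (pvBStep prev diff).sum pvMODULO, pvBStep prev diff) := by
  have hmap :
      (PySem.List.pyRange 0 26 1).map (fun j =>
        PySem.Int.mod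
          ((PySem.List.pyRange (-diff) (diff + 1) 1).foldl
            (fun acc k => if j + k < 0 ∨ 26 ≤ j + k then acc else acc + PySem.List.pyGetD prev (j + k) 0) 0)
          pvMODULO)
      = (PySem.List.pyRange 0 26 1).map (fun j =>
          if max 0 (j - diff) ≤ min 25 (j + diff) then
            PySem.Int.mod (PySem.List.pyGetD (pvPrefix prev) (min 25 (j + diff) + 1) 0
              - PySem.List.pyGetD (pvPrefix prev) (max 0 (j - diff)) 0) pvMODULO
          else 0) := by
    refine List.map_congr_left ?_
    intro j hj
    rw [PySem.List.mem_pyRange_one] at hj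
    exact pvValEq prev diff j hj.1 hj.2
  simp only [pvARow, pvBStep]
  have hA := pvAFill (fun init j =>
        PySem.Int.mod
          ((PySem.List.pyRange (-diff) (diff + 1) 1).foldl
            (fun acc k => if j + k < 0 ∨ 26 ≤ j + k then acc else acc + PySem.List.pyGetD prev (j + k) 0) init)
          pvMODULO) 26 (by omega)
  have hB := pvBFill (fun j =>
        if max 0 (j - diff) ≤ min 25 (j + diff) then
          PySem.Int.mod (PySem.List.pyGetD (pvPrefix prev) (min 25 (j + diff) + 1) 0
            - PySem.List.pyGetD (pvPrefix prev) (max 0 (j - diff)) 0) pvMODULO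
        else 0) 26 (by omega)
  simp only [Nat.cast_ofNat, Nat.sub_self, List.replicate_zero, List.append_nil] at hA hB
  rw [hA, hB]
  rw [hmap]

theorem pvLoopA (diff : Int) : ∀ (n : Nat) (i : Int) (dp : List (Int × List Int)) (p : Int × List Int),
    2 ≤ i → (i + n : Int) ≤ (dp.length : Int) → PySem.List.pyGetD dp (i - 1) (0, []) = p →
    PySem.List.pyGetD ((PySem.List.pyRange i (i + n) 1).foldl (pvAStep diff) dp) (i + n - 1) (0, [])
        = pvAIter diff n p
      ∧ ((PySem.List.pyRange i (i + n) 1).foldl (pvAStep diff) dp).length = dp.length := by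
  intro n
  induction n with
  | zero =>
    intro i dp p h2 hlen hget
    rw [PySem.List.pyRange_one_eq_nil (by omega)]
    simpa [pvAIter] using hget
  | succ n ih =>
    intro i dp p h2 hlen hget
    rw [PySem.List.pyRange_one_cons (by omega : i < i + ((n : Nat) + 1 : Nat))]
    rw [List.foldl_cons]
    have hstep : pvAStep diff dp i = PySem.List.pySetD dp i (pvARow diff p.2) := by
      rw [pvAStep, hget]
    have hin : i.toNat < dp.length := by omega
    have hset : PySem.List.pySetD dp i (pvARow diff p.2) = dp.set i.toNat (pvARow diff p.2) :=
      PySem.List.pySetD_of_nonneg dp _ (by omega)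
    have hlen' : (dp.set i.toNat (pvARow diff p.2)).length = dp.length := by simp
    have hget' : PySem.List.pyGetD (dp.set i.toNat (pvARow diff p.2)) ((i + 1) - 1) (0, [])
        = pvARow diff p.2 := by
      rw [show (i + 1) - 1 = i by ring]
      rw [PySem.List.pyGetD_eq_getElem _ _ (by omega) (by rw [hlen']; omega)]
      exact List.getElem_set_self (by omega)
    have harg : i + ((n : Nat) + 1 : Nat) = (i + 1) + (n : Nat) := by push_cast; ring
    rw [hstep, hset, harg]
    have := ih (i + 1) (dp.set i.toNat (pvARow diff p.2)) (pvARow diff p.2)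
      (by omega) (by rw [hlen']; omega) hget'
    rw [hlen'] at this
    exact ⟨this.1, this.2⟩


theorem pvAIter_snd (diff : Int) : ∀ (n : Nat) (p : Int × List Int),
    (pvAIter diff n p).2 = (fun r => pvBStep r diff)^[n] p.2 := by
  intro n
  induction n with
  | zero => intro p; rfl
  | succ n ih =>
    intro p
    show (pvAIter diff n (pvARow diff p.2)).2 = _
    rw [ih, pvRowEq, Function.iterate_succ_apply]

theorem pvAIter_fst (diff : Int) : ∀ (n : Nat) (p : Int × List Int),
    (pvAIter diff (n + 1) p).1 = PySem.Int.mod (pvAIter diff (n + 1) p).2.sum pvMODULO := by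
  intro n
  induction n with
  | zero =>
    intro p
    show (pvARow diff p.2).1 = PySem.Int.mod (pvARow diff p.2).2.sum pvMODULO
    rw [pvRowEq]
  | succ n ih =>
    intro p
    show (pvAIter diff (n + 1) (pvARow diff p.2)).1 = _
    exact ih (pvARow diff p.2)



-- ===== VERDICT (by name: the statement is the Claim_ definition above) =====
theorem countBalancedClips_spec : Claim_equal_countBalancedClips := by
  intro L diff _ hpre
  unfold Pre_countBalancedClips at hpre
  unfold Spec_countBalancedClips countBalancedClips countBalancedClips_alt
  dsimp only
  set n : Nat := (L - 1).toNat with hn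
  set p1 : Int × List Int := (26, List.replicate 26 1) with hp1
  set dp0 : List (Int × List Int) := List.replicate (L + 1).toNat (0, List.replicate 26 0) with hdp0
  have hlen0 : dp0.length = (L + 1).toNat := by simp [hdp0]
  have hset1 : PySem.List.pySetD dp0 1 p1 = dp0.set 1 p1 := by
    rw [PySem.List.pySetD_of_nonneg dp0 _ (by omega)]; rfl
  have hlen1 : (dp0.set 1 p1).length = (L + 1).toNat := by simp [hlen0]
  have hget1 : PySem.List.pyGetD (dp0.set 1 p1) (2 - 1) (0, []) = p1 := by
    rw [show (2 - 1 : Int) = 1 by norm_num]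
    rw [PySem.List.pyGetD_eq_getElem _ _ (by omega) (by rw [hlen1]; omega)]
    exact List.getElem_set_self (by rw [hlen1]; omega)
  have hloop := pvLoopA diff n 2 (dp0.set 1 p1) p1 (by omega)
    (by rw [hlen1]; omega) hget1
  rw [show (2 + (n : Int)) = L + 1 by rw [hn]; omega] at hloop
  obtain ⟨hF, hFlen⟩ := hloop
  set dpF := (PySem.List.pyRange 2 (L + 1) 1).foldl (pvAStep diff) (dp0.set 1 p1) with hdpF
  have hFlen' : dpF.length = (L + 1).toNat := by rw [hFlen, hlen1]
  have hne : dpF ≠ [] := by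
    intro h; rw [h] at hFlen'; simp at hFlen'; omega
  have hgetneg : PySem.List.pyGetD dpF (-1) (0, []) = pvAIter diff n p1 := by
    rw [PySem.List.pyGetD_neg_one dpF _ hne, List.getLast_eq_getElem, ← hF,
      PySem.List.pyGetD_eq_getElem _ _ (by omega) (by rw [hFlen']; omega)]
    congr 1
    rw [hFlen']
    omega
  rw [hset1, hgetneg]
  have hBfold : (PySem.List.pyRange 0 (L - 1) 1).foldl (fun prev _ => pvBStep prev diff)
      (List.replicate 26 1) = (fun r => pvBStep r diff)^[n] (List.replicate 26 1) := by
    rw [pvFoldl_const (fun r => pvBStep r diff)]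
    congr 1
    rw [PySem.List.length_pyRange_one, hn]
    omega
  rw [hBfold]
  rcases Nat.eq_zero_or_pos n with h0 | hposn
  · rw [h0]
    show p1.1 = PySem.Int.mod (List.replicate 26 1).sum pvMODULO
    decide
  · obtain ⟨m, hm⟩ : ∃ m, n = m + 1 := ⟨n - 1, by omega⟩
    rw [hm, pvAIter_fst diff m p1, pvAIter_snd diff (m + 1) p1]
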